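-- pv_equiv track=rewrite | github.com/SonicBotMan/SoloFlow | hermes-plugin/store/sqlite_store.py | _escape_fts
-- ===== SOURCE A (Python) =====
-- def _escape_fts(query: str) -> str:
--     """Escape FTS5 special characters: " * ( ) : ^
--
--     Handles:
--     - Quoted phrases ("exact match") → preserved as-is
--     - FTS5 boolean operators (AND OR NOT) → passed through
--     - Prefix wildcards (term*) → term* (quotes added around base)
--     - Content tokens → special chars stripped, wrapped in double-quotes
--     """
--     FTS5_OPS = frozenset({"AND", "OR", "NOT"})
--     safe_tokens: list[str] = []
--
--     # Parse quoted strings as atomic tokens first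
--     chars = list(query)
--     i = 0
--     while i < len(chars):
--         c = chars[i]
--         if c == '"':
--             # Collect everything up to the next unescaped quote
--             phrase_chars = ['"']
--             i += 1
--             while i < len(chars):
--                 nc = chars[i]
--                 if nc == '"':
--                     phrase_chars.append('"')
--                     i += 1
--                     break
--                 phrase_chars.append(nc)
--                 i += 1
--             safe_tokens.append("".join(phrase_chars))
--         else:
--             # Collect a whitespace-delimited word
--             word_chars = []
--             while i < len(chars) and chars[i] not in (" ", "\t", "\n"):
--                 word_chars.append(chars[i])
--                 i += 1
--             if word_chars:
--                 word = "".join(word_chars)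
--                 upper = word.upper()
--                 # Preserve FTS5 operators and bare wildcard
--                 if upper in FTS5_OPS or word == "*":
--                     safe_tokens.append(word)
--                 else:
--                     # Strip FTS5 special chars from content tokens
--                     cleaned = "".join(
--                         ch for ch in word if ch not in '"*():^'
--                     )
--                     safe_tokens.append(f'"{cleaned}"')
--             i += 1
--
--     return " AND ".join(safe_tokens)
-- ===== SOURCE B (Python) =====
-- import re
--
-- _TOKEN_RE = re.compile(r'"[^"]*"?|[^ \t\n]+')
-- _FTS5_OPS = ("AND", "OR", "NOT")
--
-- def _escape_fts(query: str) -> str: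
--     out = []
--     for tok in _TOKEN_RE.findall(query):
--         if tok.startswith('"'):
--             out.append(tok)
--         elif tok.upper() in _FTS5_OPS or tok == "*":
--             out.append(tok)
--         else:
--             cleaned = "".join(ch for ch in tok if ch not in '"*():^')
--             out.append(f'"{cleaned}"')
--     return " AND ".join(out)
-- ===== Notes on version B (the rewrite author's own statement) =====
-- stated objective: idiomatic
-- what changed: Replaces A's manual index-walking scanner (outer while with two nested character-collection loops and inline cleaning) by a single compiled-regex findall that tokenizes the query (quoted-phrase alternative with optional closing quote, or maximal non-whitespace run) followed by a per-token classification loop and one join; the C-level regex scan removes the per-character Python interpreter loop.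
import Mathlib
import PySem

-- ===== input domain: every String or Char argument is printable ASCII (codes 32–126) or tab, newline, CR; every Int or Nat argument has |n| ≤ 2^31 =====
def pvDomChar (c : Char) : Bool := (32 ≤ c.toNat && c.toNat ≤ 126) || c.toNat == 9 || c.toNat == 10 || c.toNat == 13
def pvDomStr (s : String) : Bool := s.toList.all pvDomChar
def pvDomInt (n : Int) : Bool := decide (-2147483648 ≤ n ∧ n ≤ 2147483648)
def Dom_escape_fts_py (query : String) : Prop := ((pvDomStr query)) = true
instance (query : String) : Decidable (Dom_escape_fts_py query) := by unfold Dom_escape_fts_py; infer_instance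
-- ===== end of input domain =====

-- B replaces A's manual index-walking scanner (outer while with nested char-collection loops and
-- inline cleaning) by a regex-style tokenizer pass followed by a per-token classification map; same
-- output, idiomatic decomposition.

-- shared by both ports: the delimiter test chars[i] not in (" ", "\t", "\n") (= B's [^ \t\n] class)
def pvWs (c : Char) : Bool := c == ' ' || c == '\t' || c == '\n'

-- ===== PORT A =====

-- inner while of the '"' branch: collect up to and including the next quote
def pvAPhrase : List Char → List Char × List Char
  | [] => ([], [])
  | c :: cs =>
    if c == '"' then (['"'], cs)
    else
      let pr := pvAPhrase cs
      (c :: pr.1, pr.2)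

-- inner while of the else branch: collect a whitespace-delimited word (starting at i)
def pvAWord : List Char → List Char × List Char
  | [] => ([], [])
  | c :: cs =>
    if pvWs c then ([], c :: cs)
    else
      let wr := pvAWord cs
      (c :: wr.1, wr.2)

theorem pvAPhrase_len (cs : List Char) : (pvAPhrase cs).2.length ≤ cs.length := by
  induction cs with
  | nil => simp [pvAPhrase]
  | cons c cs ih =>
    simp only [pvAPhrase]
    split <;> simp <;> omega

theorem pvAWord_len (cs : List Char) : (pvAWord cs).2.length ≤ cs.length := by
  induction cs with
  | nil => simp [pvAWord]
  | cons c cs ih =>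
    simp only [pvAWord]
    split <;> simp <;> omega

-- A's outer while loop, carrying safe_tokens (tokens kept as List Char)
def pvALoop : List Char → List (List Char) → List (List Char)
  | [], acc => acc
  | c :: cs, acc =>
    if c == '"' then
      let pr := pvAPhrase cs
      pvALoop pr.2 (acc ++ ['"' :: pr.1])
    else
      let wr := pvAWord (c :: cs)
      let acc' :=
        if wr.1.isEmpty then acc
        else
          let w := wr.1
          let upper := PySem.Chars.upper w
          if ["AND".toList, "OR".toList, "NOT".toList].contains upper || w == ['*'] then
            acc ++ [w]
          else
            acc ++ ['"' :: (w.filter (fun ch => !("\"*():^".toList.contains ch)) ++ ['"'])]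
      pvALoop (wr.2.drop 1) acc'
termination_by l _ => l.length
decreasing_by
  · have := pvAPhrase_len cs; simp; omega
  · have := pvAWord_len (c :: cs); simp at this ⊢; omega

def escape_fts_py (query : String) : String :=
  String.ofList (PySem.Chars.join " AND ".toList (pvALoop query.toList []))

-- ===== PORT B =====
-- hand-port of re.findall(r'"[^"]*"?|[^ \t\n]+', query): exact scanner for this regex —
-- a quoted alternative (optional closing quote) wins at a '"', a maximal non-whitespace run
-- otherwise, non-matching (whitespace) characters are skipped.
def pvBTokens : List Char → List (List Char)
  | [] => []
  | c :: cs =>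
    if c == '"' then
      let body := cs.takeWhile (fun x => x != '"')
      match h : cs.dropWhile (fun x => x != '"') with
      | '"' :: r => ('"' :: (body ++ ['"'])) :: pvBTokens r
      | rest => ('"' :: body) :: pvBTokens rest
    else if pvWs c then pvBTokens cs
    else
      -- maximal non-whitespace run starting at c (c itself is non-whitespace here)
      (c :: cs.takeWhile (fun x => !pvWs x)) ::
        pvBTokens (cs.dropWhile (fun x => !pvWs x))
termination_by l => l.length
decreasing_by
  all_goals
    have ha := cs.length_dropWhile_le (fun x => x != '"')
    have hb := cs.length_dropWhile_le (fun x => !pvWs x)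
    try rw [h] at ha
    try simp only [List.length_cons] at *
    try simp at ha hb
    omega

-- Source B's per-token classification
def pvBClassify (t : List Char) : List Char :=
  if PySem.Chars.startswith t ['"'] then t
  else if ["AND".toList, "OR".toList, "NOT".toList].contains (PySem.Chars.upper t) || t == ['*'] then t
  else '"' :: (t.filter (fun ch => !("\"*():^".toList.contains ch)) ++ ['"'])

def escape_fts_py_alt (query : String) : String :=
  String.ofList (PySem.Chars.join " AND ".toList ((pvBTokens query.toList).map pvBClassify))

-- ===== PRECONDITION & SPEC =====
def Spec_escape_fts_py (query : String) (out : String) : Prop := out = escape_fts_py_alt query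
instance (query : String) (out : String) : Decidable (Spec_escape_fts_py query out) := by unfold Spec_escape_fts_py; infer_instance

-- ===== CLAIM (what is proved, stated in full; the proofs are below) =====
def Claim_equal_escape_fts_py : Prop := ∀ (query : String), Dom_escape_fts_py query → Spec_escape_fts_py query (escape_fts_py query)

-- ===== LEMMAS AND PROOFS =====

theorem pvDropWhile_head_false (p : Char → Bool) (cs : List Char) (d : Char) (r : List Char)
    (h : cs.dropWhile p = d :: r) : p d = false := by
  have hne : cs.dropWhile p ≠ [] := by rw [h]; simp
  have h1 := List.head_dropWhile_not p hne
  have h2 : (cs.dropWhile p).head hne = d := by simp [h]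
  rw [h2] at h1
  simpa using h1

-- A's phrase loop is B's take/dropWhile split (the closing quote, when present, is rest.take 1)
theorem pvAPhrase_spec (cs : List Char) :
    pvAPhrase cs =
      (cs.takeWhile (fun x => x != '"') ++ (cs.dropWhile (fun x => x != '"')).take 1,
       (cs.dropWhile (fun x => x != '"')).drop 1) := by
  induction cs with
  | nil => simp [pvAPhrase]
  | cons c cs ih =>
    by_cases h : c = '"'
    · subst h; simp [pvAPhrase, List.takeWhile_cons, List.dropWhile_cons]
    · simp [pvAPhrase, List.takeWhile_cons, List.dropWhile_cons, h, ih]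

-- A's word loop is B's take/dropWhile split
theorem pvAWord_spec (cs : List Char) :
    pvAWord cs = (cs.takeWhile (fun x => !pvWs x), cs.dropWhile (fun x => !pvWs x)) := by
  induction cs with
  | nil => simp [pvAWord]
  | cons c cs ih =>
    by_cases h : pvWs c = true
    · simp [pvAWord, h, List.takeWhile_cons, List.dropWhile_cons]
    · simp [pvAWord, h, List.takeWhile_cons, List.dropWhile_cons, ih]

theorem pvBClassify_quote (l : List Char) : pvBClassify ('"' :: l) = '"' :: l := by
  unfold pvBClassify
  rw [if_pos]
  exact (PySem.Chars.startswith_iff _ _).mpr ⟨l, rfl⟩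

theorem pvBClassify_word (c : Char) (w : List Char) (h : ¬ c = '"') :
    pvBClassify (c :: w) =
      if ["AND".toList, "OR".toList, "NOT".toList].contains (PySem.Chars.upper (c :: w))
          || (c :: w) == ['*'] then c :: w
      else '"' :: ((c :: w).filter (fun ch => !("\"*():^".toList.contains ch)) ++ ['"']) := by
  unfold pvBClassify
  rw [if_neg]
  intro hs
  obtain ⟨t, ht⟩ := (PySem.Chars.startswith_iff _ _).mp hs
  simp at ht
  exact h ht.1.symm

-- the heart: A's interleaved loop = B's tokenize-then-classify
theorem pvLoop_eq_tokens (n : Nat) :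
    ∀ cs : List Char, cs.length ≤ n → ∀ acc,
      pvALoop cs acc = acc ++ (pvBTokens cs).map pvBClassify := by
  induction n with
  | zero =>
    intro cs h acc
    have hnil : cs = [] := List.eq_nil_of_length_eq_zero (Nat.le_zero.mp h)
    subst hnil; simp [pvALoop, pvBTokens]
  | succ n ih =>
    intro cs h acc
    cases cs with
    | nil => simp [pvALoop, pvBTokens]
    | cons c cs' =>
      simp only [List.length_cons, Nat.add_le_add_iff_right] at h
      by_cases hq : c = '"'
      · subst hq
        rw [pvALoop, pvAPhrase_spec, pvBTokens]
        cases hrest : cs'.dropWhile (fun x => x != '"') with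
        | nil =>
          simp [hrest, pvALoop, pvBTokens, pvBClassify_quote]
        | cons d r =>
          have hd : d = '"' := by
            have := pvDropWhile_head_false _ _ _ _ hrest; simpa using this
          subst hd
          have hlen : r.length ≤ n := by
            have := cs'.length_dropWhile_le (fun x => x != '"')
            rw [hrest] at this; simp at this; omega
          simp only [hrest]
          simp [ih r hlen, pvBClassify_quote]
      · by_cases hw : pvWs c = true
        · rw [pvALoop, pvBTokens]
          rw [pvAWord_spec]
          simp [hq, hw, List.takeWhile_cons, List.dropWhile_cons, ih cs' h]
        · rw [pvALoop, pvBTokens]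
          rw [pvAWord_spec]
          cases hrest : cs'.dropWhile (fun x => !pvWs x) with
          | nil =>
            simp [hq, hw,  hrest, List.takeWhile_cons, List.dropWhile_cons,
              pvALoop, pvBClassify_word c _ hq]
            split <;> simp [pvBTokens]
          | cons d r =>
            have hd : pvWs d = true := by
              have := pvDropWhile_head_false _ _ _ _ hrest; simpa using this
            have hdq : ¬ (d == '"') = true := by
              intro hc
              have : d = '"' := by simpa using hc
              subst this
              simp [pvWs] at hd
            have hlen : r.length ≤ n := by
              have := cs'.length_dropWhile_le (fun x => !pvWs x)
              rw [hrest] at this; simp at this; omega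
            rw [pvBTokens]
            simp [hq, hw,  hrest, hd, hdq, List.takeWhile_cons, List.dropWhile_cons,
              ih r hlen, pvBClassify_word c _ hq]
            split <;> simp

-- ===== VERDICT (by name: the statement is the Claim_ definition above) =====
theorem escape_fts_py_spec : Claim_equal_escape_fts_py := by
  intro q _
  unfold Spec_escape_fts_py escape_fts_py escape_fts_py_alt
  rw [pvLoop_eq_tokens q.toList.length q.toList le_rfl []]
  rfl
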